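-- pv_equiv track=rewrite | github.com/mvkumar14/Practice | Code_Challenges/digit_degree.py | digitDegree
-- ===== SOURCE A (Python) =====
-- def digitDegree(n):
--     if len(str(n)) == 1:
--         return 0
--     digit_degree = 0
--     while True:
--         digit_sum = 0
--         digit_degree += 1
--         for i in str(n):
--             digit_sum += int(i)
--         if digit_sum < 10:
--             return digit_degree
--         n = digit_sum
-- ===== SOURCE B (Python) =====
-- def digitDegree(n):
--     # recursive decomposition with arithmetic digit extraction (no str())
--     if n < 10:
--         return 0
--     s = 0
--     m = n
--     while m:
--         s += m % 10
--         m //= 10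
--     return 1 + digitDegree(s)
-- ===== Notes on version B (the rewrite author's own statement) =====
-- stated objective: alternative
-- what changed: A's iterative while-True loop with a degree counter and a string-based digit sum (str(n), int(c)) is replaced by a recursive decomposition (0 if n < 10, else 1 + digitDegree(digit sum)) whose digit sum is computed arithmetically with % 10 and // 10, with no string conversion.
import Mathlib
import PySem

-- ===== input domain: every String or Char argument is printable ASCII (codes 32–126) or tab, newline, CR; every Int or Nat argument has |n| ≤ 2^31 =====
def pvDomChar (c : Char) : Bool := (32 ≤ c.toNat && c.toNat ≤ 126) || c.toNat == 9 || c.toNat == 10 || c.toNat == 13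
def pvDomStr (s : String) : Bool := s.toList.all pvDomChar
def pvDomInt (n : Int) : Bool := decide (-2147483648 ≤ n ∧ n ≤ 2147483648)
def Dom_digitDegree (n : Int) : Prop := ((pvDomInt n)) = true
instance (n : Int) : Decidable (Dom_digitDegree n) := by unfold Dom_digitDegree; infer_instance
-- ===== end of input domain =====

-- B replaces A's string-based while-loop (a counter plus per-iteration str(n) digit walk) by a
-- recursive decomposition with an arithmetic (%10, //10) digit sum; objective: alternative.

-- ===== PORT A =====
-- `digit_sum = 0; for i in str(n): digit_sum += int(i)`; `none` = int(i) raised ValueError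
def pvDigitSumA (cs : List Char) : Option Int :=
  cs.foldl (fun acc c =>
    match acc with
    | none => none
    | some s =>
      match PySem.Int.ofChars? [c] with
      | none => none
      | some d => some (s + d)) (some 0)

-- A's `while True` loop; fuel only makes it total (it is never exhausted on inputs Pre_ admits);
-- the `none` branch is the ValueError Pre_ excludes
def pvLoopA (fuel : Nat) (n deg : Int) : Int :=
  match fuel with
  | 0 => 0
  | fuel + 1 =>
    match pvDigitSumA (PySem.Int.toChars n) with
    | none => 0
    | some s => if s < 10 then deg + 1 else pvLoopA fuel s (deg + 1)

def digitDegree (n : Int) : Int :=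
  if (PySem.Int.toChars n).length == 1 then 0
  else pvLoopA (n.toNat + 1) n 0

-- ===== PORT B =====
-- termination facts for B's two loops (cited by the definitions below)
theorem pvFloordiv10_toNat_lt (m : Int) (h : 0 < m) :
    (PySem.Int.floordiv m 10).toNat < m.toNat := by
  rw [PySem.Int.floordiv_eq_ediv_of_pos (by norm_num)]
  omega

-- B's inner `while m: s += m % 10; m //= 10` loop (the `0 < m` guard only makes it total;
-- B only runs it with m ≥ 10, where it agrees with Python step for step)
def pvDigitSumB (m : Int) : Int :=
  if h : 0 < m then PySem.Int.mod m 10 + pvDigitSumB (PySem.Int.floordiv m 10)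
  else 0
termination_by m.toNat
decreasing_by exact pvFloordiv10_toNat_lt m h

theorem pvDigitSumB_nonneg (m : Int) : 0 ≤ pvDigitSumB m := by
  induction m using pvDigitSumB.induct with
  | case1 m h ih =>
    rw [pvDigitSumB, dif_pos h]
    have := PySem.Int.mod_nonneg m (b := 10) (by norm_num)
    omega
  | case2 m h => rw [pvDigitSumB, dif_neg h]

theorem pvDigitSumB_le (m : Int) : pvDigitSumB m ≤ m ∨ m ≤ 0 := by
  induction m using pvDigitSumB.induct with
  | case1 m h ih =>
    rw [pvDigitSumB, dif_pos h]
    have hqr := PySem.Int.floordiv_mul_add_mod m 10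
    have hq0 : 0 ≤ PySem.Int.floordiv m 10 := by
      rw [PySem.Int.floordiv_eq_ediv_of_pos (by norm_num)]
      exact Int.ediv_nonneg (le_of_lt h) (by norm_num)
    have hS0 := pvDigitSumB_nonneg (PySem.Int.floordiv m 10)
    rcases ih with h1 | h1
    · left; omega
    · have : PySem.Int.floordiv m 10 = 0 := le_antisymm h1 hq0
      rw [this, pvDigitSumB, dif_neg (by omega)]
      left; omega
  | case2 m h => right; omega

theorem pvDigitSumB_lt (m : Int) (h : 10 ≤ m) : pvDigitSumB m < m := by
  rw [pvDigitSumB, dif_pos (by omega)]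
  have hqr := PySem.Int.floordiv_mul_add_mod m 10
  have hr0 := PySem.Int.mod_nonneg m (b := 10) (by norm_num)
  have hrlt := PySem.Int.mod_lt m (b := 10) (by norm_num)
  have hq1 : 1 ≤ PySem.Int.floordiv m 10 := by omega
  rcases pvDigitSumB_le (PySem.Int.floordiv m 10) with h1 | h1 <;> omega

def digitDegree_alt (n : Int) : Int :=
  if h : n < 10 then 0
  else 1 + digitDegree_alt (pvDigitSumB n)
termination_by n.toNat
decreasing_by
  have h1 := pvDigitSumB_lt n (by omega)
  have h2 := pvDigitSumB_nonneg n
  omega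

-- ===== PRECONDITION & SPEC =====
-- Pre_ excludes exactly the negative inputs: there `int('-')` inside A's loop raises ValueError
def Pre_digitDegree (n : Int) : Prop := 0 ≤ n
instance (n : Int) : Decidable (Pre_digitDegree n) := by unfold Pre_digitDegree; infer_instance
def pvWitness_digitDegree : Int := (42)

def Spec_digitDegree (n : Int) (out : Int) : Prop := out = digitDegree_alt n
instance (n : Int) (out : Int) : Decidable (Spec_digitDegree n out) := by unfold Spec_digitDegree; infer_instance

-- ===== CLAIM (what is proved, stated in full; the proofs are below) =====
def Claim_equal_digitDegree : Prop := ∀ (n : Int), Dom_digitDegree n → Pre_digitDegree n → Spec_digitDegree n (digitDegree n)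

-- ===== LEMMAS AND PROOFS =====

theorem pvDigitSumB_pos (m : Int) (h : 0 < m) : 0 < pvDigitSumB m := by
  induction m using pvDigitSumB.induct with
  | case1 m hm ih =>
    rw [pvDigitSumB, dif_pos hm]
    have hqr := PySem.Int.floordiv_mul_add_mod m 10
    have hr0 := PySem.Int.mod_nonneg m (b := 10) (by norm_num)
    have hrlt := PySem.Int.mod_lt m (b := 10) (by norm_num)
    have hS0 := pvDigitSumB_nonneg (PySem.Int.floordiv m 10)
    by_cases hq : 0 < PySem.Int.floordiv m 10
    · have := ih hq; omega
    · -- floordiv m 10 ≤ 0, so m = its mod, which is positive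
      omega
  | case2 m hm => omega

theorem pvOfChars_digitChar (d : Nat) (h : d < 10) :
    PySem.Int.ofChars? [Nat.digitChar d] = some (d : Int) := by
  interval_cases d <;> decide

theorem pvDigitSumB_step (m : Nat) (h : 0 < m) :
    pvDigitSumB (m : Int) = ((m % 10 : Nat) : Int) + pvDigitSumB ((m / 10 : Nat) : Int) := by
  rw [pvDigitSumB, dif_pos (by exact_mod_cast h)]
  rw [PySem.Int.mod_eq_emod_of_pos (by norm_num), PySem.Int.floordiv_eq_ediv_of_pos (by norm_num)]
  have h1 : (m:Int) % 10 = ((m % 10 : Nat) : Int) := by omega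
  have h2 : (m:Int) / 10 = ((m / 10 : Nat) : Int) := by omega
  rw [h1, h2]

theorem pvDigitSumB_zero : pvDigitSumB 0 = 0 := by
  rw [pvDigitSumB]
  simp

theorem digitDegree_alt_lt (n : Int) (h : n < 10) : digitDegree_alt n = 0 := by
  rw [digitDegree_alt, dif_pos h]

theorem digitDegree_alt_ge (n : Int) (h : ¬ n < 10) :
    digitDegree_alt n = 1 + digitDegree_alt (pvDigitSumB n) := by
  conv_lhs => rw [digitDegree_alt]
  rw [dif_neg h]

theorem pvSumA_toDigits (m : Nat) :
    pvDigitSumA (Nat.toDigits 10 m) = some (pvDigitSumB (m : Int)) := by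
  induction m using Nat.strong_induction_on with
  | _ m ih =>
    by_cases hm : m < 10
    · rw [Nat.toDigits_of_lt_base hm]
      unfold pvDigitSumA
      simp only [List.foldl, pvOfChars_digitChar m hm]
      by_cases h0 : m = 0
      · subst h0; simp [pvDigitSumB_zero]
      · rw [pvDigitSumB_step m (by omega), Nat.mod_eq_of_lt hm, Nat.div_eq_of_lt hm]
        rw [Nat.cast_zero, pvDigitSumB_zero]
        simp only [Option.some.injEq]
        omega
    · rw [Nat.toDigits_of_base_le (by norm_num) (by omega)]
      unfold pvDigitSumA
      rw [List.foldl_append]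
      have hdiv : m / 10 < m := Nat.div_lt_self (by omega) (by norm_num)
      have hl := ih (m / 10) hdiv
      unfold pvDigitSumA at hl
      rw [hl]
      simp only [List.foldl, pvOfChars_digitChar (m % 10) (Nat.mod_lt _ (by norm_num))]
      rw [pvDigitSumB_step m (by omega)]
      simp only [Option.some.injEq]
      omega

theorem pvToDigits_ne_nil (m : Nat) : Nat.toDigits 10 m ≠ [] := by
  rw [Nat.toDigits_eq_if (by norm_num)]
  split <;> simp

theorem pvToDigits_len1 (m : Nat) : (Nat.toDigits 10 m).length = 1 ↔ m < 10 := by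
  constructor
  · intro hl
    by_contra hm
    rw [Nat.toDigits_of_base_le (by norm_num) (by omega)] at hl
    have := pvToDigits_ne_nil (m / 10)
    simp [List.length_append] at hl
    exact this hl
  · intro hm
    rw [Nat.toDigits_of_lt_base hm]
    rfl

theorem pvToChars_nonneg (n : Int) (h : 0 ≤ n) :
    PySem.Int.toChars n = Nat.toDigits 10 n.toNat := by
  simp [PySem.Int.toChars, not_lt.mpr h]

theorem pvLoopA_eq (fuel : Nat) : ∀ n deg : Int, 10 ≤ n → n.toNat ≤ fuel →
    pvLoopA fuel n deg = deg + digitDegree_alt n := by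
  induction fuel with
  | zero => intro n deg h10 hf; exact absurd hf (by omega)
  | succ fuel ih =>
    intro n deg h10 hf
    have hn0 : 0 ≤ n := by omega
    have hs := pvSumA_toDigits n.toNat
    have hcast : ((n.toNat : Nat) : Int) = n := by omega
    rw [hcast] at hs
    simp only [pvLoopA, pvToChars_nonneg n hn0, hs]
    have hspos := pvDigitSumB_pos n (by omega)
    have hslt := pvDigitSumB_lt n h10
    by_cases hs10 : pvDigitSumB n < 10
    · rw [if_pos hs10]
      rw [digitDegree_alt_ge n (by omega), digitDegree_alt_lt (pvDigitSumB n) hs10]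
      omega
    · rw [if_neg hs10]
      rw [ih (pvDigitSumB n) (deg + 1) (by omega) (by omega)]
      rw [digitDegree_alt_ge n (by omega)]
      omega

-- ===== VERDICT (by name: the statement is the Claim_ definition above) =====
theorem digitDegree_spec : Claim_equal_digitDegree := by
  intro n _ hpre
  unfold Spec_digitDegree digitDegree
  have hn : 0 ≤ n := hpre
  rw [pvToChars_nonneg n hn]
  by_cases h10 : n < 10
  · rw [if_pos (by simp only [beq_iff_eq, pvToDigits_len1]; omega)]
    rw [digitDegree_alt_lt n h10]
  · rw [if_neg (by simp only [beq_iff_eq, pvToDigits_len1]; omega)]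
    rw [pvLoopA_eq (n.toNat + 1) n 0 (by omega) (by omega)]
    omega
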